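-- pv_equiv track=rewrite | github.com/comfyanonymous/ComfyUI | custom_nodes/comfyui-easy-use/py/libs/wildcards.py | decimal_to_irregular
-- ===== SOURCE A (Python) =====
-- def decimal_to_irregular(n, bases):
--     """
--     将十进制数转换为不规则进制
--
--     :param n: 十进制数
--     :param bases: 各位置的基数列表，从低位到高位
--     :return: 不规则进制表示的列表，从低位到高位
--     """
--     if n == 0:
--         return [0] * len(bases) if bases else [0]
--
--     digits = []
--     remaining = n
--
--     # 从低位到高位处理
--     for base in bases:
--         digit = remaining % base
--         digits.append(digit)
--         remaining = remaining // base
--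
--     return digits
-- ===== SOURCE B (Python) =====
-- def decimal_to_irregular(n, bases):
--     """Recursive decomposition with divmod and a zero-remainder short-circuit:
--     once the remainder hits 0, the rest of the digits are filled with zeros in
--     one step instead of dividing further."""
--     if not bases:
--         return [0] if n == 0 else []
--     return _go(n, bases)
--
-- def _go(r, bases):
--     if r == 0:
--         return [0] * len(bases)
--     if not bases:
--         return []
--     q, d = divmod(r, bases[0])
--     return [d] + _go(q, bases[1:])
-- ===== Notes on version B (the rewrite author's own statement) =====
-- stated objective: alternative
-- what changed: Replaces A's iterative loop that mutates a remainder and appends to a digits list by a structural recursion that conses each digit from divmod and short-circuits as soon as the remainder reaches zero, bulk-filling the remaining digits with zeros without further divisions.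
-- outside the precondition, e.g. on decimal_to_irregular(5, [0, 3]): A raises ZeroDivisionError, B raises ZeroDivisionError
import Mathlib
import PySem

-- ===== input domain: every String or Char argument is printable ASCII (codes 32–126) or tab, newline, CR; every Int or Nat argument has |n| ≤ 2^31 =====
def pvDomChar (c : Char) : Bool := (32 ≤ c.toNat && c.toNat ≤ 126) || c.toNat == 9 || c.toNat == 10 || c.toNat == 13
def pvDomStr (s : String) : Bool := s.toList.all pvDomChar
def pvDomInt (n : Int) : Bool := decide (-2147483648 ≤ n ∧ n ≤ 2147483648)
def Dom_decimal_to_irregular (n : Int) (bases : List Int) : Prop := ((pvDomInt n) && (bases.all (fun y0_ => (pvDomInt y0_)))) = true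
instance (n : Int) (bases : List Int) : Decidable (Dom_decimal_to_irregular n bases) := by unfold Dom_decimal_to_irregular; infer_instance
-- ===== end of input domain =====

-- B replaces A's iterative mutate-and-append loop by a structural recursion that conses
-- digits from divmod and short-circuits with a bulk zero-fill once the remainder is 0;
-- equal return value wherever A returns.

-- ===== PORT A =====
-- loop: digit = remaining % base; digits.append(digit); remaining = remaining // base
def decimal_to_irregular (n : Int) (bases : List Int) : List Int :=
  if n = 0 then (if bases.isEmpty then [0] else List.replicate bases.length 0)
  else
    (bases.foldl (fun (st : List Int × Int) base =>
      (st.1 ++ [PySem.Int.mod st.2 base], PySem.Int.floordiv st.2 base)) ([], n)).1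

-- ===== PORT B =====
-- helper _go: zero-remainder short-circuit, else cons divmod digit and recurse on the tail.
-- divmod(r, b) is ported as its two components (PySem.Int.floordiv r b, PySem.Int.mod r b);
-- exact for b ≠ 0, and a zero base with a nonzero remainder lies outside Pre_.
def pvGo (r : Int) (bases : List Int) : List Int :=
  if r = 0 then List.replicate bases.length 0
  else
    match bases with
    | [] => []
    | b :: t => PySem.Int.mod r b :: pvGo (PySem.Int.floordiv r b) t

def decimal_to_irregular_alt (n : Int) (bases : List Int) : List Int :=
  if bases.isEmpty then (if n = 0 then [0] else []) else pvGo n bases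

-- ===== PRECONDITION & SPEC =====
-- Pre_ excludes exactly the inputs where Python A raises ZeroDivisionError:
-- a zero base with n ≠ 0 (the n = 0 guard returns before any division).
def Pre_decimal_to_irregular (n : Int) (bases : List Int) : Prop :=
  n = 0 ∨ (0 : Int) ∉ bases
instance (n : Int) (bases : List Int) : Decidable (Pre_decimal_to_irregular n bases) := by
  unfold Pre_decimal_to_irregular; infer_instance

def pvWitness_decimal_to_irregular : Int × List Int := (11, [2, 3, 5])

def Spec_decimal_to_irregular (n : Int) (bases : List Int) (out : List Int) : Prop := out = decimal_to_irregular_alt n bases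
instance (n : Int) (bases : List Int) (out : List Int) : Decidable (Spec_decimal_to_irregular n bases out) := by unfold Spec_decimal_to_irregular; infer_instance

-- ===== CLAIM (what is proved, stated in full; the proofs are below) =====
def Claim_equal_decimal_to_irregular : Prop := ∀ (n : Int) (bases : List Int), Dom_decimal_to_irregular n bases → Pre_decimal_to_irregular n bases → Spec_decimal_to_irregular n bases (decimal_to_irregular n bases)

-- ===== LEMMAS AND PROOFS =====

-- A's digit chain, written as a recursion (no zero short-circuit)
def pvDigits (r : Int) (bs : List Int) : List Int :=
  match bs with
  | [] => []
  | b :: t => PySem.Int.mod r b :: pvDigits (PySem.Int.floordiv r b) t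

theorem pvA_loop (bs : List Int) : ∀ (acc : List Int) (r : Int),
    (bs.foldl (fun (st : List Int × Int) base =>
      (st.1 ++ [PySem.Int.mod st.2 base], PySem.Int.floordiv st.2 base)) (acc, r)).1
    = acc ++ pvDigits r bs := by
  induction bs with
  | nil => intro acc r; simp [pvDigits]
  | cons b t ih =>
      intro acc r
      simp only [List.foldl_cons, pvDigits, ih, List.append_assoc, List.singleton_append]

theorem pvDigits_zero (bs : List Int) (h : (0 : Int) ∉ bs) :
    pvDigits 0 bs = List.replicate bs.length 0 := by
  induction bs with
  | nil => simp [pvDigits]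
  | cons b t ih =>
      have hb : b ≠ 0 := fun hb => h (hb ▸ List.mem_cons_self ..)
      have ht : (0 : Int) ∉ t := fun hm => h (List.mem_cons_of_mem _ hm)
      simp [pvDigits, PySem.Int.mod, PySem.Int.floordiv, ih ht, List.replicate_succ]


theorem pvDigits_eq_go (bs : List Int) : ∀ (r : Int), (0 : Int) ∉ bs →
    pvDigits r bs = pvGo r bs := by
  induction bs with
  | nil =>
      intro r _
      by_cases hr : r = 0 <;> simp [pvDigits, pvGo, hr]
  | cons b t ih =>
      intro r h
      have hb : b ≠ 0 := fun hb => h (hb ▸ List.mem_cons_self ..)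
      have ht : (0 : Int) ∉ t := fun hm => h (List.mem_cons_of_mem _ hm)
      by_cases hr : r = 0
      · subst hr
        rw [pvDigits_zero _ h]
        simp [pvGo]
      · rw [pvGo, if_neg hr]
        simp only [pvDigits, ih _ ht]

-- ===== VERDICT (by name: the statement is the Claim_ definition above) =====
theorem decimal_to_irregular_spec : Claim_equal_decimal_to_irregular := by
  intro n bases _ pre
  unfold Spec_decimal_to_irregular decimal_to_irregular decimal_to_irregular_alt
  by_cases hbe : bases = []
  · subst hbe
    by_cases hn : n = 0 <;> simp [hn]
  · have hb : bases.isEmpty = false := by simpa [List.isEmpty_iff] using hbe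
    by_cases hn : n = 0
    · subst hn
      rw [if_pos rfl, hb]
      rw [pvGo.eq_def]
      simp
    · have h0 : (0 : Int) ∉ bases := pre.resolve_left hn
      rw [if_neg hn, pvA_loop bases [] n, List.nil_append, pvDigits_eq_go bases n h0, hb]
      simp
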